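-- pv_equiv track=rewrite | github.com/Maingron/actions-multirunner-docker | docker/scripts/status.py | assign_pool_slots
-- ===== SOURCE A (Python) =====
-- def assign_pool_slots(rows: list[dict[str, str]]) -> list[str]:
--     """Mirror entrypoint.assign_pool_slots for the config-row shape used here."""
--     counts: dict[str, int] = {}
--     for row in rows:
--         counts[row["title"]] = counts.get(row["title"], 0) + 1
--     running: dict[str, int] = {}
--     slots: list[str] = []
--     for row in rows:
--         if counts[row["title"]] <= 1:
--             slots.append("")
--             continue
--         idx = running.get(row["title"], 0) + 1
--         running[row["title"]] = idx
--         slots.append(f"-p{idx:02d}")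
--     return slots
-- ===== SOURCE B (Python) =====
-- def assign_pool_slots(rows: list[dict[str, str]]) -> list[str]:
--     """Group row indices by title in one pass, then scatter suffixes for each
--     duplicated group into a preallocated result list."""
--     groups: dict[str, list[int]] = {}
--     for i, row in enumerate(rows):
--         t = row["title"]
--         groups[t] = groups.get(t, []) + [i]
--     slots = [""] * len(rows)
--     for idxs in groups.values():
--         if len(idxs) == 1:
--             continue
--         for rank, pos in enumerate(idxs, start=1):
--             slots[pos] = f"-p{rank:02d}"
--     return slots
-- ===== Notes on version B (the rewrite author's own statement) =====
-- stated objective: alternative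
-- what changed: Replaces A's two sequential passes with a running-counter dict by a group-then-scatter scheme: one dict maps each title to its list of row indices, and suffixes are written by group position into a preallocated result list.
import Mathlib
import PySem

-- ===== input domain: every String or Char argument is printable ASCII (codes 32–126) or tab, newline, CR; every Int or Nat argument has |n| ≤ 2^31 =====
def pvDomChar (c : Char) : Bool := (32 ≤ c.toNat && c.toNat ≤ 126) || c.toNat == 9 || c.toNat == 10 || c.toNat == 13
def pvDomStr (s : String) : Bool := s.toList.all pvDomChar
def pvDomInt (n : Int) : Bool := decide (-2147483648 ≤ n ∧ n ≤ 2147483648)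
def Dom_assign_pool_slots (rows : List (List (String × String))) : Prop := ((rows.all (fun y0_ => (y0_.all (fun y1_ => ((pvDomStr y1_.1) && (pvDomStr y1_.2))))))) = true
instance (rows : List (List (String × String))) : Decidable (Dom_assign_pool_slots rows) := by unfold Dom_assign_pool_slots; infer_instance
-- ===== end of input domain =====

-- B replaces A's two sequential passes (count dict, then running-counter dict with appends)
-- by a group-then-scatter scheme: a dict from title to its row indices, suffixes written by
-- group position into a preallocated list (objective: alternative decomposition, same cost).

-- row["title"]: Pre_ guarantees the key is present, so the getD default is never read
def pvTitle (row : List (String × String)) : String :=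
  (PySem.Dict.ofList row).getD "title" ""

-- f"-p{idx:02d}" (both Pythons contain this same f-string)
def pvFmt (idx : Int) : String :=
  "-p" ++ PySem.Str.zfill (PySem.Int.toStr idx) 2

-- ===== PORT A =====
def assign_pool_slots (rows : List (List (String × String))) : List String :=
  let counts : PySem.Dict String Int :=
    rows.foldl (fun d row => d.insert (pvTitle row) (d.getD (pvTitle row) 0 + 1)) PySem.Dict.empty
  (rows.foldl (fun (st : PySem.Dict String Int × List String) row =>
      let t := pvTitle row
      if counts.getD t 0 ≤ 1 then (st.1, st.2 ++ [""])
      else (st.1.insert t (st.1.getD t 0 + 1), st.2 ++ [pvFmt (st.1.getD t 0 + 1)]))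
    ((PySem.Dict.empty : PySem.Dict String Int), ([] : List String))).2

-- ===== PORT B =====
-- slots[pos] = … is List.set: every pos stored in groups is an index of rows, so in range.
def assign_pool_slots_alt (rows : List (List (String × String))) : List String :=
  let titles := rows.map pvTitle
  let groups : PySem.Dict String (List Nat) :=
    titles.zipIdx.foldl (fun d p => d.modify p.1 [] (fun x => x ++ [p.2])) PySem.Dict.empty
  groups.values.foldl
    (fun slots idxs =>
      if idxs.length = 1 then slots
      else (idxs.foldl (fun (st : Int × List String) pos =>
              (st.1 + 1, st.2.set pos (pvFmt st.1))) (1, slots)).2)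
    (List.replicate rows.length "")

-- ===== PRECONDITION & SPEC =====
-- Pre_ excludes exactly the rows lacking a "title" key, on which the Python A raises KeyError.
def Pre_assign_pool_slots (rows : List (List (String × String))) : Prop :=
  ∀ row ∈ rows, (PySem.Dict.ofList row).contains "title" = true
instance (rows : List (List (String × String))) : Decidable (Pre_assign_pool_slots rows) := by
  unfold Pre_assign_pool_slots; infer_instance

def pvWitness_assign_pool_slots : (List (List (String × String))) :=
  [[("title", "a")], [("title", "b"), ("url", "u")], [("title", "a")]]

def Spec_assign_pool_slots (rows : List (List (String × String))) (out : List String) : Prop := out = assign_pool_slots_alt rows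
instance (rows : List (List (String × String))) (out : List String) : Decidable (Spec_assign_pool_slots rows out) := by unfold Spec_assign_pool_slots; infer_instance

-- ===== CLAIM (what is proved, stated in full; the proofs are below) =====
def Claim_equal_assign_pool_slots : Prop := ∀ (rows : List (List (String × String))), Dom_assign_pool_slots rows → Pre_assign_pool_slots rows → Spec_assign_pool_slots rows (assign_pool_slots rows)

-- ===== LEMMAS AND PROOFS =====

/-- Common pointwise description both ports are reduced to: the slot at position `j`. -/
def pvTgt (ts : List String) (j : Nat) : String :=
  if ts.count (ts.getD j "") ≤ 1 then ""
  else pvFmt (((ts.take j).count (ts.getD j "") : Int) + 1)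

/-- A's second loop (over the title list, with its condition already rewritten to the
total count) produces exactly the per-position suffix values; `done` is the processed prefix,
and the running dict `r` agrees with `done`'s counts on every duplicated title. -/
theorem loopA_eq (ts : List String) :
    ∀ (suffix done : List String) (r : PySem.Dict String Int) (acc : List String),
      ts = done ++ suffix →
      (∀ t : String, 1 < ts.count t → r.getD t 0 = ((done.count t : Nat) : Int)) →
      (suffix.foldl (fun (st : PySem.Dict String Int × List String) t =>
          if ((ts.count t : Nat) : Int) ≤ 1 then (st.1, st.2 ++ [""])
          else (st.1.insert t (st.1.getD t 0 + 1), st.2 ++ [pvFmt (st.1.getD t 0 + 1)]))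
        (r, acc)).2
      = acc ++ (PySem.List.enumerate suffix (done.length : Int)).map
          (fun p => if ts.count p.2 ≤ 1 then ""
                    else pvFmt (((PySem.List.slice ts none (some p.1)).count p.2 : Int) + 1)) := by
  intro suffix
  induction suffix with
  | nil => intro done r acc _ _; simp [PySem.List.enumerate_nil]
  | cons t rest ih =>
    intro done r acc hts hinv
    have hcast : (((ts.count t : Nat) : Int) ≤ 1) ↔ ts.count t ≤ 1 := by exact_mod_cast Iff.rfl
    have hts' : ts = (done ++ [t]) ++ rest := by simpa [List.append_assoc] using hts
    rw [List.foldl_cons, PySem.List.enumerate_cons]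
    by_cases hc : ts.count t ≤ 1
    · rw [if_pos (hcast.mpr hc)]
      have hinv' : ∀ t' : String, 1 < ts.count t' →
          r.getD t' 0 = (((done ++ [t]).count t' : Nat) : Int) := by
        intro t' h
        by_cases ht' : t' = t
        · subst ht'; omega
        · rw [hinv t' h]
          simp [List.count_append, Ne.symm ht']
      rw [ih (done ++ [t]) r (acc ++ [""]) hts' hinv']
      simp [hc, List.append_assoc]
    · rw [if_neg (fun h => hc (hcast.mp h))]
      have hgt : 1 < ts.count t := by omega
      have hidx : r.getD t 0 = ((done.count t : Nat) : Int) := hinv t hgt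
      have hinv' : ∀ t' : String, 1 < ts.count t' →
          (r.insert t (r.getD t 0 + 1)).getD t' 0 = (((done ++ [t]).count t' : Nat) : Int) := by
        intro t' h
        rw [PySem.Dict.getD_insert]
        by_cases ht' : t' = t
        · rw [if_pos ht', hidx, ht']
          simp [List.count_append]
        · rw [if_neg ht', hinv t' h]
          simp [List.count_append, Ne.symm ht']
      rw [ih (done ++ [t]) (r.insert t (r.getD t 0 + 1)) (acc ++ [pvFmt (r.getD t 0 + 1)]) hts' hinv']
      have hslice : PySem.List.slice ts none (some ((done.length : Nat) : Int)) = done := by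
        rw [PySem.List.slice_to_natCast, hts, List.take_left]
      simp only [List.map_cons]
      rw [if_neg (by omega), hslice, hidx]
      simp [List.append_assoc]

/-- enumerate-then-map as a map over positions. -/
theorem enum_map_eq {α : Type} (dflt : α) (f : Int × α → String) :
    ∀ (ts : List α) (s : Int),
      (PySem.List.enumerate ts s).map f
        = (List.range ts.length).map (fun (k : Nat) => f (s + (k : Int), ts.getD k dflt)) := by
  intro ts
  induction ts with
  | nil => intro s; simp [PySem.List.enumerate_nil]
  | cons x xs ih =>
    intro s
    rw [PySem.List.enumerate_cons, List.map_cons, ih (s + 1),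
        List.length_cons, List.range_succ_eq_map, List.map_cons, List.map_map]
    congr 1
    · norm_num
    · apply List.map_congr_left
      intro k _
      have h1 : s + 1 + (k : Int) = s + ((k + 1 : Nat) : Int) := by push_cast; ring
      simp [Function.comp, h1, Nat.succ_eq_add_one]

/-- A equals the pointwise target description. -/
theorem portA_eq_tgt (rows : List (List (String × String))) :
    assign_pool_slots rows
      = (List.range (rows.map pvTitle).length).map (pvTgt (rows.map pvTitle)) := by
  unfold assign_pool_slots
  have hfold1 : rows.foldl (fun d row => d.insert (pvTitle row) (d.getD (pvTitle row) 0 + 1)) (PySem.Dict.empty : PySem.Dict String Int)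
      = (rows.map pvTitle).foldl (fun d x => d.insert x (d.getD x 0 + 1)) PySem.Dict.empty := by
    rw [List.foldl_map]
  have hcounts : ∀ t : String,
      (rows.foldl (fun d row => d.insert (pvTitle row) (d.getD (pvTitle row) 0 + 1)) (PySem.Dict.empty : PySem.Dict String Int)).getD t 0
        = (((rows.map pvTitle).count t : Nat) : Int) := by
    intro t
    rw [hfold1, PySem.Dict.getD_foldl_insert_add_one]
    simp [PySem.Dict.getD_empty]
  simp only [hcounts]
  have hfold2 :
      rows.foldl (fun (st : PySem.Dict String Int × List String) row =>
          if (((rows.map pvTitle).count (pvTitle row) : Nat) : Int) ≤ 1 then (st.1, st.2 ++ [""])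
          else (st.1.insert (pvTitle row) (st.1.getD (pvTitle row) 0 + 1), st.2 ++ [pvFmt (st.1.getD (pvTitle row) 0 + 1)]))
        ((PySem.Dict.empty : PySem.Dict String Int), ([] : List String))
      = (rows.map pvTitle).foldl (fun (st : PySem.Dict String Int × List String) t =>
          if (((rows.map pvTitle).count t : Nat) : Int) ≤ 1 then (st.1, st.2 ++ [""])
          else (st.1.insert t (st.1.getD t 0 + 1), st.2 ++ [pvFmt (st.1.getD t 0 + 1)]))
        ((PySem.Dict.empty : PySem.Dict String Int), ([] : List String)) := by
    rw [List.foldl_map]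
  rw [hfold2]
  have hmain := loopA_eq (rows.map pvTitle) (rows.map pvTitle) [] PySem.Dict.empty [] rfl
    (by intro t _; simp [PySem.Dict.getD_empty])
  simp only [List.length_nil, Nat.cast_zero, List.nil_append] at hmain
  rw [hmain, enum_map_eq ""]
  apply List.map_congr_left
  intro k hk
  rw [List.mem_range] at hk
  have hsl : PySem.List.slice (rows.map pvTitle) none (some ((0 : Int) + (k : Nat))) = (rows.map pvTitle).take k := by
    rw [zero_add, PySem.List.slice_to_natCast]
  rw [hsl]
  rfl

/-- The scatter loop preserves the slot-list length. -/
theorem scatter_length (P : List Nat) :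
    ∀ (r : Int) (slots : List String),
      ((P.foldl (fun (st : Int × List String) pos =>
          (st.1 + 1, st.2.set pos (pvFmt st.1))) (r, slots)).2).length = slots.length := by
  induction P with
  | nil => intro r slots; rfl
  | cons p P ih => intro r slots; rw [List.foldl_cons]; rw [ih]; simp

/-- The scatter loop over the positions of `t`, described pointwise. -/
theorem scatter_getD (t : String) :
    ∀ (ts : List String) (n : Nat) (slots : List String) (r : Int) (j : Nat),
      n + ts.length ≤ slots.length →
      (((((ts.zipIdx n).filter (fun p => p.1 == t)).map (fun p => p.2)).foldl
          (fun (st : Int × List String) pos => (st.1 + 1, st.2.set pos (pvFmt st.1)))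
          (r, slots)).2).getD j ""
      = if n ≤ j ∧ j < n + ts.length ∧ ts.getD (j - n) "" = t
        then pvFmt (r + ((ts.take (j - n)).count t : Int))
        else slots.getD j "" := by
  intro ts
  induction ts with
  | nil =>
    intro n slots r j _
    simp only [List.zipIdx_nil, List.filter_nil, List.map_nil, List.foldl_nil]
    rw [if_neg (by rintro ⟨h1, h2, -⟩; simp at h2; omega)]
  | cons x xs ih =>
    intro n slots r j hlen
    rw [List.zipIdx_cons]
    by_cases hx : x = t
    · subst hx
      rw [show List.filter (fun p => p.1 == x) ((x, n) :: xs.zipIdx (n + 1))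
            = (x, n) :: List.filter (fun p => p.1 == x) (xs.zipIdx (n + 1)) by simp]
      rw [List.map_cons, List.foldl_cons]
      have hrec := ih (n + 1) (slots.set n (pvFmt r)) (r + 1) j
        (by simp only [List.length_set, List.length_cons] at hlen ⊢; omega)
      rw [hrec]
      by_cases hj : j = n
      · subst hj
        rw [if_neg (by omega), if_pos ⟨Nat.le_refl _, by simp only [List.length_cons]; omega, by simp⟩]
        simp only [Nat.sub_self, List.take_zero, List.count_nil, List.getD]
        rw [List.getElem?_set]
        rw [if_pos rfl, if_pos (by simp only [List.length_cons] at hlen; omega)]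
        simp
      · by_cases hcond : n ≤ j ∧ j < n + (x :: xs).length ∧ (x :: xs).getD (j - n) "" = x
        · have hn1 : n + 1 ≤ j := by omega
          have hj1 : j < n + 1 + xs.length := by
            have := hcond.2.1; simp only [List.length_cons] at this; omega
          have hget : xs.getD (j - (n + 1)) "" = x := by
            have := hcond.2.2
            have hd : j - n = (j - (n + 1)) + 1 := by omega
            rwa [hd, List.getD_cons_succ] at this
          rw [if_pos ⟨hn1, hj1, hget⟩, if_pos hcond]
          have htake : (x :: xs).take (j - n) = x :: xs.take (j - (n + 1)) := by
            have hd : j - n = (j - (n + 1)) + 1 := by omega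
            rw [hd, List.take_succ_cons]
          rw [htake]
          congr 1
          simp
          ring
        · have hcond' : ¬ (n + 1 ≤ j ∧ j < n + 1 + xs.length ∧ xs.getD (j - (n + 1)) "" = x) := by
            intro ⟨h1, h2, h3⟩
            apply hcond
            refine ⟨by omega, by simp only [List.length_cons]; omega, ?_⟩
            have hd : j - n = (j - (n + 1)) + 1 := by omega
            rw [hd, List.getD_cons_succ]; exact h3
          rw [if_neg hcond', if_neg hcond]
          simp only [List.getD]
          rw [List.getElem?_set, if_neg (fun h => hj h.symm)]
    · rw [show List.filter (fun p => p.1 == t) ((x, n) :: xs.zipIdx (n + 1))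
            = List.filter (fun p => p.1 == t) (xs.zipIdx (n + 1)) by simp [hx]]
      rw [ih (n + 1) slots r j (by simp only [List.length_cons] at hlen; omega)]
      by_cases hj : j = n
      · subst hj
        rw [if_neg (by omega), if_neg (by intro h; exact hx (by simpa using h.2.2))]
      · by_cases hcond : n + 1 ≤ j ∧ j < n + 1 + xs.length ∧ xs.getD (j - (n + 1)) "" = t
        · rw [if_pos hcond]
          have hd : j - n = (j - (n + 1)) + 1 := by omega
          rw [if_pos ⟨by omega, by simp only [List.length_cons]; omega, by rw [hd, List.getD_cons_succ]; exact hcond.2.2⟩]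
          rw [hd, List.take_succ_cons]
          congr 2
          simp [hx]
        · rw [if_neg hcond, if_neg]
          intro ⟨h1, h2, h3⟩
          apply hcond
          have hn1 : n + 1 ≤ j := by
            rcases Nat.lt_or_ge j (n + 1) with h | h
            · exfalso
              have : j = n := by omega
              subst this
              simp at h3
              exact hx h3
            · exact h
          refine ⟨hn1, by simp only [List.length_cons] at h2 ⊢; omega, ?_⟩
          have hd : j - n = (j - (n + 1)) + 1 := by omega
          rw [hd, List.getD_cons_succ] at h3
          exact h3

/-- Positions of `t` are exactly `count t` many. -/
theorem pos_length (t : String) :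
    ∀ (ts : List String) (n : Nat),
      ((((ts.zipIdx n).filter (fun p => p.1 == t)).map (fun p => p.2))).length = ts.count t := by
  intro ts
  induction ts with
  | nil => intro n; simp
  | cons x xs ih =>
    intro n
    rw [List.zipIdx_cons]
    by_cases hx : x = t
    · subst hx; simp [ih]
    · simp [hx, ih]

/-- Outer fold over groups (as position lists of the processed titles), pointwise. -/
theorem outer_getD (ts : List String) :
    ∀ (K : List String) (slots : List String), slots.length = ts.length →
      ∀ j : Nat,
      ((K.map (fun t => ((ts.zipIdx 0).filter (fun p => p.1 == t)).map (fun p => p.2))).foldl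
          (fun slots idxs =>
            if idxs.length = 1 then slots
            else (idxs.foldl (fun (st : Int × List String) pos =>
                    (st.1 + 1, st.2.set pos (pvFmt st.1))) (1, slots)).2)
          slots).getD j ""
      = if ts.getD j "" ∈ K ∧ j < ts.length ∧ ¬ (ts.count (ts.getD j "") ≤ 1)
        then pvFmt (1 + ((ts.take j).count (ts.getD j "") : Int))
        else slots.getD j "" := by
  intro K
  induction K with
  | nil => intro slots _ j; simp
  | cons t K ih =>
    intro slots hlen j
    rw [List.map_cons, List.foldl_cons]
    by_cases hone : (((ts.zipIdx 0).filter (fun p => p.1 == t)).map (fun p => p.2)).length = 1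
    · rw [if_pos hone, ih slots hlen j]
      have hcnt : ts.count t = 1 := by rw [← pos_length t ts 0]; exact hone
      by_cases hc : ts.getD j "" ∈ K ∧ j < ts.length ∧ ¬ (ts.count (ts.getD j "") ≤ 1)
      · rw [if_pos hc, if_pos ⟨List.mem_cons_of_mem t hc.1, hc.2⟩]
      · rw [if_neg hc, if_neg]
        intro ⟨h1, h2, h3⟩
        rcases List.mem_cons.mp h1 with h | h
        · rw [h] at h3; omega
        · exact hc ⟨h, h2, h3⟩
    · rw [if_neg hone]
      have hslen : ((((ts.zipIdx 0).filter (fun p => p.1 == t)).map (fun p => p.2)).foldl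
          (fun (st : Int × List String) pos => (st.1 + 1, st.2.set pos (pvFmt st.1))) (1, slots)).2.length
          = ts.length := by rw [scatter_length, hlen]
      rw [ih _ hslen j]
      have hsc := scatter_getD t ts 0 slots 1 j (by omega)
      simp only [Nat.zero_add, Nat.sub_zero, Nat.zero_le, true_and] at hsc
      by_cases hc : ts.getD j "" ∈ K ∧ j < ts.length ∧ ¬ (ts.count (ts.getD j "") ≤ 1)
      · rw [if_pos hc, if_pos ⟨List.mem_cons_of_mem t hc.1, hc.2⟩]
      · rw [if_neg hc, hsc]
        by_cases hj : j < ts.length ∧ ts.getD j "" = t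
        · have hcnt : ts.count t ≠ 1 := by rw [← pos_length t ts 0]; exact hone
          have hpos : 0 < ts.count t := by
            apply List.count_pos_iff.mpr
            rw [← hj.2, List.getD_eq_getElem _ _ hj.1]
            exact List.getElem_mem _
          rw [if_pos ⟨hj.1, hj.2⟩, if_pos ⟨by rw [hj.2]; exact List.mem_cons_self, hj.1, by rw [hj.2]; omega⟩]
          rw [hj.2]
        · rw [if_neg (fun h => hj ⟨h.1, h.2⟩), if_neg]
          intro ⟨h1, h2, h3⟩
          rcases List.mem_cons.mp h1 with h | h
          · exact hj ⟨h2, h⟩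
          · exact hc ⟨h, h2, h3⟩

/-- B equals the pointwise target description. -/
theorem portB_eq_tgt (rows : List (List (String × String))) :
    assign_pool_slots_alt rows
      = (List.range (rows.map pvTitle).length).map (pvTgt (rows.map pvTitle)) := by
  unfold assign_pool_slots_alt
  dsimp only
  have hnodup : ((rows.map pvTitle).zipIdx.foldl
      (fun d p => d.modify p.1 [] (fun x => x ++ [p.2])) (PySem.Dict.empty : PySem.Dict String (List Nat))).keys.Nodup := by
    exact PySem.Dict.nodup_keys_foldl_modify_key ((rows.map pvTitle).zipIdx) (fun (p : String × Nat) => p.1) ([] : List Nat) (fun _ p x => x ++ [p.2]) _ (by rw [PySem.Dict.keys_empty]; exact List.nodup_nil)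
  have hkeys : ((rows.map pvTitle).zipIdx.foldl
      (fun d p => d.modify p.1 [] (fun x => x ++ [p.2])) (PySem.Dict.empty : PySem.Dict String (List Nat))).keys
      = PySem.Set.ofList (rows.map pvTitle) := by
    rw [PySem.Dict.keys_foldl_modify_key ((rows.map pvTitle).zipIdx) (fun (p : String × Nat) => p.1) ([] : List Nat) (fun _ p x => x ++ [p.2])]
    rw [PySem.Dict.keys_empty, List.zipIdx_map_fst]
    rfl
  have hgetD : ∀ t : String, ((rows.map pvTitle).zipIdx.foldl
      (fun d p => d.modify p.1 [] (fun x => x ++ [p.2])) (PySem.Dict.empty : PySem.Dict String (List Nat))).getD t []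
      = (((rows.map pvTitle).zipIdx.filter (fun p => p.1 == t)).map (fun p => p.2)) := by
    intro t
    rw [PySem.Dict.getD_foldl_modify_append]
    simp [PySem.Dict.getD_empty]
  have hvals : ((rows.map pvTitle).zipIdx.foldl
      (fun d p => d.modify p.1 [] (fun x => x ++ [p.2])) (PySem.Dict.empty : PySem.Dict String (List Nat))).values
      = (PySem.Set.ofList (rows.map pvTitle)).map
          (fun t => (((rows.map pvTitle).zipIdx.filter (fun p => p.1 == t)).map (fun p => p.2))) := by
    rw [PySem.Dict.values_eq_map_keys _ hnodup []]
    rw [hkeys]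
    apply List.map_congr_left
    intro t _
    exact hgetD t
  rw [hvals]
  have hreplen : (List.replicate rows.length "").length = (rows.map pvTitle).length := by simp
  apply List.ext_getElem
  · rw [show ∀ (L : List (List Nat)) (init : List String),
        (L.foldl (fun slots idxs => if idxs.length = 1 then slots
          else (idxs.foldl (fun (st : Int × List String) pos =>
            (st.1 + 1, st.2.set pos (pvFmt st.1))) (1, slots)).2) init).length = init.length from ?_]
    · simp
    · intro L
      induction L with
      | nil => intro init; rfl
      | cons idxs L ihL =>
        intro init
        rw [List.foldl_cons, ihL]
        by_cases h : idxs.length = 1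
        · rw [if_pos h]
        · rw [if_neg h, scatter_length]
  · intro j h1 h2
    rw [List.getElem_map, List.getElem_range]
    have hj : j < (rows.map pvTitle).length := by simpa using h2
    have hout := outer_getD (rows.map pvTitle) (PySem.Set.ofList (rows.map pvTitle))
      (List.replicate rows.length "") (by simp) j
    rw [← List.getD_eq_getElem _ "" h1, hout]
    have hmem : (rows.map pvTitle).getD j "" ∈ PySem.Set.ofList (rows.map pvTitle) := by
      rw [PySem.Set.mem_ofList, List.getD_eq_getElem _ _ hj]
      exact List.getElem_mem _
    have hrep : (List.replicate rows.length "").getD j "" = "" := by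
      rcases Nat.lt_or_ge j rows.length with h | h
      · simp [List.getD, h]
      · simp [List.getD, Nat.not_lt.mpr h]
    unfold pvTgt
    by_cases hc : (rows.map pvTitle).count ((rows.map pvTitle).getD j "") ≤ 1
    · rw [if_pos hc, if_neg (fun h => h.2.2 hc), hrep]
    · rw [if_neg hc, if_pos ⟨hmem, hj, hc⟩]
      congr 1
      ring

-- ===== VERDICT (by name: the statement is the Claim_ definition above) =====
theorem assign_pool_slots_spec : Claim_equal_assign_pool_slots := by
  intro rows _ _
  unfold Spec_assign_pool_slots
  rw [portA_eq_tgt, portB_eq_tgt]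

theorem pvWitness_ok :
    Dom_assign_pool_slots pvWitness_assign_pool_slots ∧ Pre_assign_pool_slots pvWitness_assign_pool_slots := by
  constructor
  · decide
  · unfold Pre_assign_pool_slots pvWitness_assign_pool_slots; decide
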